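-- pv_equiv track=rewrite | github.com/guoweier/JunD | scripts/module_seed_assembly.py | remove_tips
-- ===== SOURCE A (Python) =====
-- def remove_tips(graph, max_tip_length):
--     """
--     Remove tips (dead-end paths) in a De Bruijn graph.
--     Args:
--         graph (dict): The De Bruijn graph represented as an adjacency list. Keys are nodes, and values are lists of tuples (neighbor, overlap).
--         max_tip_length (int): The maximum length for a tip. Tips longer than this length are not removed.
--     Returns:
--         dict: The De Bruijn graph with tips removed.
--     """
--     def calculate_path_length(path):
--         """Calculate the total length of a path."""
--         total_length = 0
--         for node, overlap in path:
--             total_length += len(node)*2-overlap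
--         return total_length
--
--     def is_startnode(node):
--         """Define the node is the appropriate node (dead-end node or its parent is outgoing node) for tracing tips."""
--         return sum(1 for edges in list(graph.values()) if (node in dict(edges) and len(edges) > 1)) > 0
--
--
--     def find_tip(start_node):
--         """
--         Trace a tip starting from a given node.
--         Args:
--             start_node (str): The node to start tracing the tip from.
--         Returns:
--             list: The nodes in the tip path.
--         """
--         tip_path = [(start_node, len(start_node))]
--         current_node = start_node
--         while current_node in graph:
--             if len(graph[current_node]) == 1:
--                 next_node, overlap = graph[current_node][0]
--                 if sum(1 for edges in list(graph.values()) if next_node in dict(edges)) == 1: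
--                     tip_path.append((next_node, overlap))
--                     current_node = next_node
--                 elif sum(1 for edges in list(graph.values()) if next_node in dict(edges)) > 1:
--                     tip_path = []
--                     break
--             elif len(graph[current_node]) > 1:
--                 tip_path = []
--                 break
--             elif len(graph[current_node]) == 0:
--                 break
--         return tip_path
--
--     # Identify and remove tips
--     nodes_to_remove = set()
--     for node in list(graph.keys()):
--         # Check for dead-end paths (no outgoing edges)
--         if is_startnode(node):
--             tip_path = find_tip(node)
--             tip_length = calculate_path_length(tip_path)
--             # Mark nodes in the tip for removal if it's shorter than the max_tip_length
--             if tip_length <= max_tip_length: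
--                 nodes_to_remove.update(tip_path)
--     # Remove marked nodes from the graph
--     for node, overlap in nodes_to_remove:
--         graph.pop(node, None)
--         for neighbors in list(graph.values()):
--             neighbors[:] = [n for n in neighbors if n[0] != node]
--     return graph
-- ===== SOURCE B (Python) =====
-- def remove_tips(graph, max_tip_length):
--     """Remove short dead-end tips by tracing predecessor chains BACKWARD from sinks.
--
--     A walks forward from every child of a branching node, rescanning the whole
--     graph at each step.  B builds occurrence counts, a unique-predecessor table,
--     the branch-children set and the sink set, each in one pass; then it walks
--     backward from each sink (dead end) along the unambiguous predecessor chain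
--     until it stops, and the visited chain is a removable tip iff its stopping
--     node is a graph key fed by a branching node and the chain is short enough.
--     Returns a new dict (does not mutate the argument, unlike A).
--     """
--     occ = {}
--     for edges in graph.values():
--         for name in {n for n, _ in edges}:
--             occ[name] = occ.get(name, 0) + 1
--     # c -> (x, ov) for a key x whose whole edge list is [(c, ov)]
--     parent = {e[0][0]: (x, e[0][1]) for x, e in graph.items() if len(e) == 1}
--     branch_children = set()
--     for edges in graph.values():
--         if len(edges) > 1:
--             branch_children |= {n for n, _ in edges}
--     sinks = {x for x, edges in graph.items() if not edges}
--     sinks |= {n for edges in graph.values() for n, _ in edges if n not in graph}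
--
--     removed = set()
--     for t in sinks:
--         names = [t]
--         length = len(t)
--         cur = t
--         while occ.get(cur, 0) == 1 and cur in parent:
--             x, ov = parent[cur]
--             length += len(cur) - ov + len(x)
--             names.append(x)
--             cur = x
--         if cur in graph and cur in branch_children and length <= max_tip_length:
--             removed.update(names)
--
--     return {k: [e for e in edges if e[0] not in removed]
--             for k, edges in graph.items() if k not in removed}
-- ===== Notes on version B (the rewrite author's own statement) =====
-- stated objective: faster
-- what changed: B inverts the traversal: instead of walking forward from every child of a branching node with a full-graph rescan per step, it precomputes occurrence counts, a unique-predecessor table, branch children and the sink set in single passes, then walks each dead-end's predecessor chain BACKWARD to its unique branching origin, and rebuilds the graph in one pass instead of per-node pop-and-filter loops.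
import Mathlib
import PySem

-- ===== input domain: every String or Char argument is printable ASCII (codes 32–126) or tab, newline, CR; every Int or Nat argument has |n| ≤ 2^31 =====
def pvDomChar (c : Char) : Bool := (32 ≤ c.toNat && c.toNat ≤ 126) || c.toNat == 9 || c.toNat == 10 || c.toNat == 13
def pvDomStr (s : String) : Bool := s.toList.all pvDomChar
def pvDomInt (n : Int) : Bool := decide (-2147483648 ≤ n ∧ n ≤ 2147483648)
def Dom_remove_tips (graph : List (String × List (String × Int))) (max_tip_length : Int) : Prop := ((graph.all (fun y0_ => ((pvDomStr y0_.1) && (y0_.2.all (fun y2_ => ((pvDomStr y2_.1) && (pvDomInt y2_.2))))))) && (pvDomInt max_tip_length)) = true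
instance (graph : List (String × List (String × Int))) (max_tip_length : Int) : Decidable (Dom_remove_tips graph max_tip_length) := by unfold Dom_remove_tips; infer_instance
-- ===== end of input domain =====

-- B inverts the traversal (backward from sinks with precomputed tables instead of
-- forward from branch children with full-graph rescans; objective: faster). A mutates
-- its argument in place and returns it; B returns a fresh dict — the equivalence
-- proved here is about the RETURN value only.

-- ===== PORT A =====
-- sum(1 for edges in list(graph.values()) if x in dict(edges))
def pvCountA (g : List (String × List (String × Int))) (x : String) : Int :=
  g.foldl (fun acc kv => if x ∈ kv.2.map Prod.fst then acc + 1 else acc) 0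

-- is_startnode
def pvIsStartA (g : List (String × List (String × Int))) (node : String) : Bool :=
  decide (0 < g.foldl (fun acc kv => if node ∈ kv.2.map Prod.fst ∧ 1 < kv.2.length then acc + 1 else acc) (0 : Int))

-- calculate_path_length
def pvCalcLenA (path : List (String × Int)) : Int :=
  path.foldl (fun acc p => acc + PySem.Str.len p.1 * 2 - p.2) 0

-- find_tip's while loop; fuel g.length + 1 suffices on every input admitted by
-- Pre_remove_tips (outside it Python A loops forever)
def pvFindTipA (g : List (String × List (String × Int))) :
    Nat → String → List (String × Int) → List (String × Int)
  | 0, _, path => path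
  | fuel+1, cur, path =>
    match PySem.Dict.get? (PySem.Dict.mk g) cur with
    | none => path
    | some es =>
      if es.length = 1 then
        match PySem.List.pyGet? es 0 with
        | some (nxt, ov) =>
          if pvCountA g nxt = 1 then pvFindTipA g fuel nxt (path ++ [(nxt, ov)])
          else if 1 < pvCountA g nxt then []
          else pvFindTipA g fuel cur path  -- Python A loops forever here; unreachable (the count is ≥ 1)
        | none => path  -- unreachable: es.length = 1
      else if 1 < es.length then []
      else path

def remove_tips (graph : List (String × List (String × Int))) (max_tip_length : Int) :
    List (String × List (String × Int)) :=
  let removed : PySem.Set (String × Int) :=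
    (graph.map Prod.fst).foldl (fun s node =>
      if pvIsStartA graph node then
        let tip := pvFindTipA graph (graph.length + 1) node [(node, PySem.Str.len node)]
        if pvCalcLenA tip ≤ max_tip_length then PySem.Set.update s tip else s
      else s) PySem.Set.empty
  removed.foldl (fun g2 p =>
    (PySem.Dict.erase (PySem.Dict.mk g2) p.1).items.map
      (fun kv => (kv.1, kv.2.filter (fun e => e.1 != p.1)))) graph

-- ===== PORT B =====
-- occ[name] = occ.get(name, 0) + 1 over the distinct neighbour names of each list
def pvOccB (g : List (String × List (String × Int))) : PySem.Dict String Int :=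
  g.foldl (fun d kv =>
    (PySem.Set.ofList (kv.2.map Prod.fst)).foldl (fun d n => d.modify n 0 (· + 1)) d)
    PySem.Dict.empty

-- parent = {e[0][0]: (x, e[0][1]) for x, e in graph.items() if len(e) == 1}
def pvParentB (g : List (String × List (String × Int))) : PySem.Dict String (String × Int) :=
  g.foldl (fun d kv =>
    match kv.2 with
    | [(c, ov)] => d.insert c (kv.1, ov)
    | _ => d) PySem.Dict.empty

-- branch_children
def pvBranchB (g : List (String × List (String × Int))) : PySem.Set String :=
  g.foldl (fun s kv =>
    if 1 < kv.2.length then PySem.Set.update s (PySem.Set.ofList (kv.2.map Prod.fst)) else s)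
    PySem.Set.empty

-- sinks = {x for x, edges in graph.items() if not edges} | {n for ... if n not in graph}
def pvSinksB (g : List (String × List (String × Int))) : PySem.Set String :=
  let s1 : PySem.Set String :=
    g.foldl (fun s kv => if kv.2.isEmpty then PySem.Set.add s kv.1 else s) PySem.Set.empty
  PySem.Set.update s1
    ((g.flatMap (fun kv => kv.2.map Prod.fst)).filter
      (fun n => !(PySem.Dict.contains (PySem.Dict.mk g) n)))

-- B's backward while loop (carries visited names, running length, current node);
-- fuel g.length + 1 suffices under Pre_remove_tips (distinct keys make the
-- predecessor chain from a sink acyclic)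
def pvWalkB (occD : PySem.Dict String Int) (parentD : PySem.Dict String (String × Int)) :
    Nat → String → List String → Int → List String × Int × String
  | 0, cur, names, acc => (names, acc, cur)
  | fuel+1, cur, names, acc =>
    if occD.getD cur 0 = 1 then
      match parentD.get? cur with
      | some (x, ov) =>
          pvWalkB occD parentD fuel x (names ++ [x])
            (acc + PySem.Str.len cur - ov + PySem.Str.len x)
      | none => (names, acc, cur)
    else (names, acc, cur)

def remove_tips_alt (graph : List (String × List (String × Int))) (max_tip_length : Int) :
    List (String × List (String × Int)) :=
  let occD := pvOccB graph
  let parentD := pvParentB graph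
  let branch := pvBranchB graph
  let sinks := pvSinksB graph
  let removed : PySem.Set String :=
    sinks.foldl (fun s t =>
      let r := pvWalkB occD parentD (graph.length + 1) t [t] (PySem.Str.len t)
      if PySem.Dict.contains (PySem.Dict.mk graph) r.2.2
          && PySem.Set.contains branch r.2.2
          && decide (r.2.1 ≤ max_tip_length)
      then PySem.Set.update s r.1 else s) PySem.Set.empty
  (graph.filter (fun kv => !(PySem.Set.contains removed kv.1))).map
    (fun kv => (kv.1, kv.2.filter (fun e => !(PySem.Set.contains removed e.1))))

-- ===== PRECONDITION & SPEC =====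
-- One step of the tip walk as a partial map on nodes (a property of the input graph only)
def pvTipStep (g : List (String × List (String × Int))) (cur : String) : Option String :=
  match g.find? (fun kv => kv.1 == cur) with
  | some (_, [(nxt, _)]) =>
      if g.countP (fun kv => decide (nxt ∈ kv.2.map Prod.fst)) = 1 then some nxt else none
  | _ => none

def pvTipIter (g : List (String × List (String × Int))) : Nat → Option String → Option String
  | 0, o => o
  | n+1, o => pvTipIter g n (o.bind (pvTipStep g))

-- Pre_ excludes (a) association lists with duplicate keys — a Python dict cannot carry
-- them, so the list encoding's first/last-match behaviour there is accidental — and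
-- (b) exactly the graphs on which Python A DIVERGES: a key that is the child of a
-- branching node (A's start-node test) whose tip walk enters a cycle makes A's while
-- loop run forever (e.g. {'a': [('b',1),('c',1)], 'c': [('c',0)]}); A returns on every
-- other representable input.
def Pre_remove_tips (graph : List (String × List (String × Int))) (max_tip_length : Int) : Prop :=
  (graph.map Prod.fst).Nodup ∧
  ∀ kv ∈ graph, (∃ kv' ∈ graph, kv.1 ∈ kv'.2.map Prod.fst ∧ 1 < kv'.2.length) →
    pvTipIter graph (graph.length + 1) (some kv.1) = none
instance (graph : List (String × List (String × Int))) (max_tip_length : Int) : Decidable (Pre_remove_tips graph max_tip_length) := by unfold Pre_remove_tips; infer_instance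

def pvWitness_remove_tips : (List (String × List (String × Int))) × Int :=
  ([("a", [("b", 1), ("c", 1)]), ("b", [("d", 1)])], 5)

def Spec_remove_tips (graph : List (String × List (String × Int))) (max_tip_length : Int) (out : List (String × List (String × Int))) : Prop := out = remove_tips_alt graph max_tip_length
instance (graph : List (String × List (String × Int))) (max_tip_length : Int) (out : List (String × List (String × Int))) : Decidable (Spec_remove_tips graph max_tip_length out) := by unfold Spec_remove_tips; infer_instance

-- ===== CLAIM (what is proved, stated in full; the proofs are below) =====
def Claim_equal_remove_tips : Prop := ∀ (graph : List (String × List (String × Int))) (max_tip_length : Int), Dom_remove_tips graph max_tip_length → Pre_remove_tips graph max_tip_length → Spec_remove_tips graph max_tip_length (remove_tips graph max_tip_length)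

-- ===== LEMMAS AND PROOFS =====

theorem pvWitness_ok :
    Dom_remove_tips pvWitness_remove_tips.1 pvWitness_remove_tips.2 ∧
    Pre_remove_tips pvWitness_remove_tips.1 pvWitness_remove_tips.2 := by decide

-- ---- proof-layer abbreviations ----
def pvLook (g : List (String × List (String × Int))) (c : String) :
    Option (List (String × Int)) := PySem.Dict.get? (PySem.Dict.mk g) c

def pvOccN (g : List (String × List (String × Int))) (c : String) : Nat :=
  g.countP (fun kv => decide (c ∈ kv.2.map Prod.fst))

def pvBstep (g : List (String × List (String × Int))) (c : String) : Option (String × Int) :=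
  if (pvOccB g).getD c 0 = 1 then (pvParentB g).get? c else none

def pvSink (g : List (String × List (String × Int))) (c : String) : Prop :=
  pvLook g c = none ∨ pvLook g c = some []

def pvPChain (g : List (String × List (String × Int))) :
    String → List (String × Int) → Prop
  | _, [] => True
  | c, (n, ov) :: rest => pvLook g c = some [(n, ov)] ∧ pvOccN g n = 1 ∧ pvPChain g n rest

def pvEnd (c : String) (rest : List (String × Int)) : String :=
  (rest.map Prod.fst).getLastD c

def pvLinks (g : List (String × List (String × Int))) (c : String)
    (rest : List (String × Int)) : Prop := pvPChain g c rest ∧ pvSink g (pvEnd c rest)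

def pvTipOf (g : List (String × List (String × Int))) (s : String) : List (String × Int) :=
  pvFindTipA g (g.length + 1) s [(s, PySem.Str.len s)]

-- ---- occurrence-count bridges ----
theorem countA_eq (g : List (String × List (String × Int))) (x : String) :
    pvCountA g x = (pvOccN g x : Int) := by
  simpa [pvCountA, pvOccN] using
    PySem.List.foldl_ite_add_one (p := fun kv : String × List (String × Int) => x ∈ kv.2.map Prod.fst) (l := g) (a := 0)

theorem occ_getD (g : List (String × List (String × Int))) (x : String) :
    ∀ d : PySem.Dict String Int,
      (g.foldl (fun d kv =>
        (PySem.Set.ofList (kv.2.map Prod.fst)).foldl (fun d n => d.modify n 0 (· + 1)) d) d).getD x 0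
      = d.getD x 0 + (pvOccN g x : Int) := by
  induction g with
  | nil => intro d; simp [pvOccN]
  | cons kv g ih =>
    intro d
    simp only [List.foldl_cons, pvOccN, List.countP_cons] at *
    rw [ih]
    rw [PySem.Dict.getD_foldl_modify_add_one]
    have hcount : (PySem.Set.ofList (kv.2.map Prod.fst)).count x
        = if x ∈ kv.2.map Prod.fst then 1 else 0 := by
      by_cases h : x ∈ kv.2.map Prod.fst
      · rw [if_pos h]
        exact List.count_eq_one_of_mem (PySem.Set.nodup_ofList (xs := kv.2.map Prod.fst)) (by simpa [PySem.Set.mem_ofList] using h)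
      · rw [if_neg h, List.count_eq_zero]
        simpa [PySem.Set.mem_ofList] using h
    rw [hcount]
    by_cases h : x ∈ kv.2.map Prod.fst <;> simp [h] <;> ring
theorem occB_getD (g : List (String × List (String × Int))) (x : String) :
    (pvOccB g).getD x 0 = (pvOccN g x : Int) := by
  rw [pvOccB, occ_getD]; simp

theorem occN_pos (g : List (String × List (String × Int))) (kv0 : String × List (String × Int))
    (h : kv0 ∈ g) (x : String) (hx : x ∈ kv0.2.map Prod.fst) : 1 ≤ pvOccN g x :=
  List.countP_pos_iff.mpr ⟨kv0, h, by simpa using hx⟩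

-- ---- lookup bridges ----
theorem look_of_mem (g : List (String × List (String × Int))) (hnd : (g.map Prod.fst).Nodup)
    (x : String) (es : List (String × Int)) (h : (x, es) ∈ g) : pvLook g x = some es := by
  exact PySem.Dict.get?_of_mem_items (d := PySem.Dict.mk g) (by simpa using h) (by simpa using hnd)

theorem mem_of_look (g : List (String × List (String × Int))) (x : String)
    (es : List (String × Int)) (h : pvLook g x = some es) : (x, es) ∈ g := by
  simpa using PySem.Dict.mem_items_of_get?_eq_some (d := PySem.Dict.mk g) h

theorem look_none_iff (g : List (String × List (String × Int))) (x : String) :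
    pvLook g x = none ↔ x ∉ g.map Prod.fst := by
  simpa [pvLook] using PySem.Dict.get?_eq_none_iff_not_mem_keys (d := PySem.Dict.mk g) (k := x)

-- ---- parent-table characterisation ----
theorem parent_mem (g : List (String × List (String × Int))) (c x : String) (ov : Int) :
    ∀ d : PySem.Dict String (String × Int),
      (g.foldl (fun d kv =>
        match kv.2 with
        | [(c, ov)] => d.insert c (kv.1, ov)
        | _ => d) d).get? c = some (x, ov) →
      d.get? c = some (x, ov) ∨ (x, [(c, ov)]) ∈ g := by
  induction g with
  | nil => intro d h; exact Or.inl h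
  | cons kv g ih =>
    intro d h
    simp only [List.foldl_cons] at h
    rcases ih _ h with h' | h'
    · match hkv : kv.2 with
      | [(c', ov')] =>
        rw [hkv] at h'
        by_cases hc : c = c'
        · subst hc
          rw [PySem.Dict.get?_insert_self] at h'
          obtain ⟨rfl, rfl⟩ : x = kv.1 ∧ ov = ov' := by
            constructor <;> injection h' with h''  <;> simp_all
          exact Or.inr (by rw [← hkv]; simp)
        · rw [PySem.Dict.get?_insert_of_ne _ _ hc] at h'
          exact Or.inl h'
      | [] => rw [hkv] at h'; exact Or.inl h'
      | (a :: b :: rest) => rw [hkv] at h'; exact Or.inl h'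
    · exact Or.inr (List.mem_cons_of_mem _ h')

theorem parent_untouched (g : List (String × List (String × Int))) (c : String)
    (h : ∀ kv ∈ g, c ∉ kv.2.map Prod.fst) :
    ∀ d : PySem.Dict String (String × Int),
      (g.foldl (fun d kv =>
        match kv.2 with
        | [(c, ov)] => d.insert c (kv.1, ov)
        | _ => d) d).get? c = d.get? c := by
  induction g with
  | nil => intro d; rfl
  | cons kv g ih =>
    intro d
    simp only [List.foldl_cons]
    rw [ih (fun kv' hm => h kv' (List.mem_cons_of_mem _ hm))]
    match hkv : kv.2 with
    | [(c', ov')] =>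
      have hc : c ≠ c' := by
        intro hce; exact h kv (List.mem_cons_self) (by rw [hkv, hce]; simp)
      rw [PySem.Dict.get?_insert_of_ne _ _ hc]
    | [] => rfl
    | (a :: b :: rest) => rfl

theorem pvCountP_cons_true {α} (p : α → Bool) (a : α) (l : List α)
    (h : List.countP p (a :: l) = 1) (ha : p a = true) : List.countP p l = 0 := by
  rw [List.countP_cons, if_pos ha] at h; omega

theorem pvCountP_cons_tail {α} (p : α → Bool) (a : α) (l : List α)
    (h : List.countP p (a :: l) = 1) (hl : 0 < List.countP p l) :
    p a = false ∧ List.countP p l = 1 := by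
  rw [List.countP_cons] at h
  by_cases hpa : p a = true
  · rw [if_pos hpa] at h; omega
  · simp [hpa] at h ⊢; omega

theorem parent_of_mem_gen (c x : String) (ov : Int) :
    ∀ (g : List (String × List (String × Int))) (d : PySem.Dict String (String × Int)),
      (x, [(c, ov)]) ∈ g → pvOccN g c = 1 →
      (g.foldl (fun d kv =>
        match kv.2 with
        | [(c, ov)] => d.insert c (kv.1, ov)
        | _ => d) d).get? c = some (x, ov) := by
  intro g
  induction g with
  | nil => intro d hm _; cases hm
  | cons kv g ih =>
    intro d hm hocc
    simp only [pvOccN] at hocc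
    simp only [List.foldl_cons]
    rcases List.mem_cons.mp hm with rfl | hm'
    · have hzero := pvCountP_cons_true _ _ _ hocc (by simp)
      have hnotail : ∀ kv' ∈ g, c ∉ kv'.2.map Prod.fst := by
        intro kv' hkv' hcmem
        have hpos : 0 < g.countP (fun kv => decide (c ∈ kv.2.map Prod.fst)) :=
          List.countP_pos_iff.mpr ⟨kv', hkv', by simpa using hcmem⟩
        omega
      rw [parent_untouched g c hnotail]
      simp [PySem.Dict.get?_insert_self]
    · have hc : c ∈ [(c, ov)].map (Prod.fst (β := Int)) := by simp
      have hpos : 0 < g.countP (fun kv => decide (c ∈ kv.2.map Prod.fst)) :=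
        List.countP_pos_iff.mpr ⟨(x, [(c, ov)]), hm', by simpa using hc⟩
      obtain ⟨hheadb, hocc1⟩ := pvCountP_cons_tail _ _ _ hocc hpos
      have hhead : ¬ (c ∈ kv.2.map Prod.fst) := by
        intro hcm; simp [hcm] at hheadb
      have hocc' : pvOccN g c = 1 := hocc1
      -- the head's update (if any) keys a name in kv.2, hence not c
      match hkv : kv.2 with
      | [(c', ov')] => exact ih _ hm' hocc'
      | [] => exact ih _ hm' hocc'
      | (a :: b :: rest) => exact ih _ hm' hocc'

theorem parent_of_mem (g : List (String × List (String × Int))) (c x : String) (ov : Int)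
    (hm : (x, [(c, ov)]) ∈ g) (hocc : pvOccN g c = 1) :
    (pvParentB g).get? c = some (x, ov) :=
  parent_of_mem_gen c x ov g PySem.Dict.empty hm hocc

-- ---- backward-step characterisation ----
theorem two_le_length {α} (l : List α) (a b : α) (ha : a ∈ l) (hb : b ∈ l) (hne : a ≠ b) :
    2 ≤ l.length := by
  by_contra hc
  push_neg at hc
  interval_cases hl : l.length
  · simp_all
  · obtain ⟨x, rfl⟩ := List.length_eq_one_iff.mp hl
    simp_all

theorem occN_unique (g : List (String × List (String × Int))) (c : String)
    (hocc : pvOccN g c = 1) (kv1 kv2 : String × List (String × Int))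
    (h1 : kv1 ∈ g) (h2 : kv2 ∈ g) (m1 : c ∈ kv1.2.map Prod.fst) (m2 : c ∈ kv2.2.map Prod.fst) :
    kv1 = kv2 := by
  by_contra hne
  have hf1 : kv1 ∈ g.filter (fun kv => decide (c ∈ kv.2.map Prod.fst)) :=
    List.mem_filter.mpr ⟨h1, by simpa using m1⟩
  have hf2 : kv2 ∈ g.filter (fun kv => decide (c ∈ kv.2.map Prod.fst)) :=
    List.mem_filter.mpr ⟨h2, by simpa using m2⟩
  have h2l := two_le_length _ _ _ hf1 hf2 hne
  rw [← List.countP_eq_length_filter] at h2l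
  rw [pvOccN] at hocc
  omega

theorem bstep_some_mem (g : List (String × List (String × Int))) (c x : String) (ov : Int)
    (h : pvBstep g c = some (x, ov)) : pvOccN g c = 1 ∧ (x, [(c, ov)]) ∈ g := by
  rw [pvBstep] at h
  by_cases hocc : (pvOccB g).getD c 0 = 1
  · rw [if_pos hocc] at h
    have hoccN : pvOccN g c = 1 := by
      rw [occB_getD] at hocc; exact_mod_cast hocc
    rcases parent_mem g c x ov PySem.Dict.empty h with h' | h'
    · simp [PySem.Dict.get?_empty] at h'
    · exact ⟨hoccN, h'⟩
  · rw [if_neg hocc] at h; cases h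

theorem bstep_none_of_branch (g : List (String × List (String × Int))) (c : String)
    (h : ∃ kv ∈ g, c ∈ kv.2.map Prod.fst ∧ 1 < kv.2.length) : pvBstep g c = none := by
  cases hb : pvBstep g c with
  | none => rfl
  | some p =>
    obtain ⟨x, ov⟩ := p
    obtain ⟨hocc, hmem⟩ := bstep_some_mem g c x ov hb
    obtain ⟨kv, hkv, hcm, hlen⟩ := h
    have hne : kv ≠ (x, [(c, ov)]) := by
      intro he; rw [he] at hlen; simp at hlen
    exact absurd (occN_unique g c hocc kv (x, [(c, ov)]) hkv hmem hcm (by simp)) hne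

-- ---- branch-children set ----
theorem isStartA_iff (g : List (String × List (String × Int))) (x : String) :
    pvIsStartA g x = true ↔ ∃ kv ∈ g, x ∈ kv.2.map Prod.fst ∧ 1 < kv.2.length := by
  rw [pvIsStartA,
    PySem.List.foldl_ite_add_one (p := fun kv : String × List (String × Int) => x ∈ kv.2.map Prod.fst ∧ 1 < kv.2.length) (l := g) (a := 0)]
  rw [decide_eq_true_iff]
  constructor
  · intro h
    have : 0 < g.countP (fun kv => decide (x ∈ kv.2.map Prod.fst ∧ 1 < kv.2.length)) := by omega
    simpa using List.countP_pos_iff.mp this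
  · intro h
    have : 0 < g.countP (fun kv => decide (x ∈ kv.2.map Prod.fst ∧ 1 < kv.2.length)) :=
      List.countP_pos_iff.mpr (by simpa using h)
    omega

theorem branchB_mem (g : List (String × List (String × Int))) (x : String) :
    x ∈ pvBranchB g ↔ ∃ kv ∈ g, x ∈ kv.2.map Prod.fst ∧ 1 < kv.2.length := by
  have main : ∀ (l : List (String × List (String × Int))) (s : PySem.Set String),
      x ∈ l.foldl (fun s kv =>
        if 1 < kv.2.length then PySem.Set.update s (PySem.Set.ofList (kv.2.map Prod.fst)) else s) s
      ↔ x ∈ s ∨ ∃ kv ∈ l, x ∈ kv.2.map Prod.fst ∧ 1 < kv.2.length := by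
    intro l
    induction l with
    | nil => simp
    | cons kv l ih =>
      intro s
      simp only [List.foldl_cons]
      by_cases h : 1 < kv.2.length
      · rw [if_pos h, ih]
        simp [PySem.Set.mem_update, PySem.Set.mem_ofList, h]
        tauto
      · rw [if_neg h, ih]
        simp [h]
  rw [pvBranchB, main]
  simp [PySem.Set.empty]

theorem branch_contains (g : List (String × List (String × Int))) (x : String) :
    PySem.Set.contains (pvBranchB g) x = pvIsStartA g x := by
  rw [Bool.eq_iff_iff, PySem.Set.contains_iff, branchB_mem, isStartA_iff]

-- ---- sink set ----
theorem sinks_mem (g : List (String × List (String × Int))) (t : String) :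
    t ∈ pvSinksB g ↔
      ((t, ([] : List (String × Int))) ∈ g) ∨
      (∃ kv ∈ g, t ∈ kv.2.map Prod.fst ∧ pvLook g t = none) := by
  have hs1 : ∀ (l : List (String × List (String × Int))) (s : PySem.Set String),
      t ∈ l.foldl (fun s kv => if kv.2.isEmpty then PySem.Set.add s kv.1 else s) s
      ↔ t ∈ s ∨ ∃ kv ∈ l, kv.2 = [] ∧ t = kv.1 := by
    intro l
    induction l with
    | nil => simp
    | cons kv l ih =>
      intro s
      simp only [List.foldl_cons]
      by_cases h : kv.2.isEmpty
      · rw [if_pos h, ih]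
        simp [PySem.Set.mem_add, List.isEmpty_iff.mp h]
        tauto
      · rw [if_neg h, ih]
        simp only [List.mem_cons]
        constructor
        · rintro (hs | ⟨kv', hkv', he, rfl⟩)
          · exact Or.inl hs
          · exact Or.inr ⟨kv', Or.inr hkv', he, rfl⟩
        · rintro (hs | ⟨kv', hkv'', he, rfl⟩)
          · exact Or.inl hs
          · rcases hkv'' with rfl | hkv'
            · rw [List.isEmpty_iff] at h; exact absurd he h
            · exact Or.inr ⟨kv', hkv', he, rfl⟩
  rw [pvSinksB]
  simp only [PySem.Set.mem_update]
  rw [hs1]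
  simp only [PySem.Set.empty, List.not_mem_nil, false_or]
  constructor
  · rintro (⟨kv, hkv, he, rfl⟩ | hf)
    · left
      have hkve : kv = (kv.1, ([] : List (String × Int))) := by
        ext : 1 <;> simp [he]
      rw [← hkve]; exact hkv
    · right
      rw [List.mem_filter] at hf
      obtain ⟨hfm, hcond⟩ := hf
      obtain ⟨kv, hkv, hmem⟩ : ∃ kv ∈ g, t ∈ kv.2.map Prod.fst := by
        simpa [List.mem_flatMap] using hfm
      refine ⟨kv, hkv, hmem, ?_⟩
      have hcb : PySem.Dict.contains (PySem.Dict.mk g) t = decide (t ∈ g.map Prod.fst) := by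
        rw [PySem.Dict.contains_eq_decide_mem_keys]; simp
      rw [hcb] at hcond
      rw [look_none_iff]
      simpa using hcond
  · rintro (hm | ⟨kv, hkv, hmem, hlk⟩)
    · exact Or.inl ⟨(t, []), hm, rfl, rfl⟩
    · right
      rw [List.mem_filter]
      constructor
      · exact List.mem_flatMap.mpr ⟨kv, hkv, by simpa using hmem⟩
      · have hcb : PySem.Dict.contains (PySem.Dict.mk g) t = decide (t ∈ g.map Prod.fst) := by
          rw [PySem.Dict.contains_eq_decide_mem_keys]; simp
        rw [hcb]
        rw [look_none_iff] at hlk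
        simpa using hlk

-- ---- list bookkeeping helpers ----
theorem myGetLastD_eq_getLast {α} : ∀ (l : List α) (h : l ≠ []) (d : α), l.getLastD d = l.getLast h
  | [_], _, _ => by simp
  | (a :: b :: m), _, d => by
      rw [List.getLastD_cons, List.getLast_cons (by simp), myGetLastD_eq_getLast (b :: m) (by simp) a]

theorem reverse_eq_getLastD {α} (l : List α) (d : α) (h : l ≠ []) :
    l.reverse = l.getLastD d :: l.dropLast.reverse := by
  conv_lhs => rw [← List.dropLast_concat_getLast h]
  rw [List.reverse_concat]
  rw [myGetLastD_eq_getLast l h d]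

theorem pvEnd_nil (c : String) : pvEnd c [] = c := rfl

theorem pvEnd_cons (c n : String) (ov : Int) (rest : List (String × Int)) :
    pvEnd c ((n, ov) :: rest) = pvEnd n rest := by
  unfold pvEnd
  rw [List.map_cons, List.getLastD_cons]

theorem pvEnd_snoc (c t : String) (ov : Int) (rest : List (String × Int)) :
    pvEnd c (rest ++ [(t, ov)]) = t := by
  unfold pvEnd
  rw [List.map_append]
  exact List.getLastD_concat

theorem rev_decomp (c : String) (rest : List (String × Int)) :
    (c :: rest.map Prod.fst).reverse = pvEnd c rest :: (c :: rest.map Prod.fst).dropLast.reverse := by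
  rw [reverse_eq_getLastD _ c (by simp)]
  congr 1
  unfold pvEnd
  rw [List.getLastD_cons]

theorem calcLen_append (path : List (String × Int)) (nxt : String) (ov : Int) :
    pvCalcLenA (path ++ [(nxt, ov)]) = pvCalcLenA path + 2 * PySem.Str.len nxt - ov := by
  simp [pvCalcLenA, List.foldl_append]; ring

theorem calcLen_single (n : String) (s : Int) : pvCalcLenA [(n, s)] = PySem.Str.len n * 2 - s := by
  simp [pvCalcLenA]

-- ---- chain structure ----
theorem pchain_snoc (g : List (String × List (String × Int))) (t : String) (ov : Int) :
    ∀ (r : List (String × Int)) (c : String),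
      pvPChain g c (r ++ [(t, ov)]) ↔
      pvPChain g c r ∧ pvLook g (pvEnd c r) = some [(t, ov)] ∧ pvOccN g t = 1 := by
  intro r
  induction r with
  | nil =>
    intro c
    simp [pvPChain, pvEnd_nil]
  | cons p r ih =>
    obtain ⟨n, ov'⟩ := p
    intro c
    simp only [List.cons_append, pvPChain, pvEnd_cons, ih n]
    tauto

theorem links_nil_iff (g : List (String × List (String × Int))) (c : String) :
    pvLinks g c [] ↔ pvSink g c := by
  simp [pvLinks, pvPChain, pvEnd_nil]

theorem links_cons_iff (g : List (String × List (String × Int))) (c n : String) (ov : Int)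
    (rest : List (String × Int)) :
    pvLinks g c ((n, ov) :: rest) ↔
      pvLook g c = some [(n, ov)] ∧ pvOccN g n = 1 ∧ pvLinks g n rest := by
  simp only [pvLinks, pvPChain, pvEnd_cons]
  tauto

theorem links_det (g : List (String × List (String × Int))) :
    ∀ (r1 r2 : List (String × Int)) (c : String), pvLinks g c r1 → pvLinks g c r2 → r1 = r2 := by
  intro r1
  induction r1 with
  | nil =>
    intro r2 c h1 h2
    cases r2 with
    | nil => rfl
    | cons q r2 =>
      obtain ⟨n2, ov2⟩ := q
      rw [links_nil_iff] at h1
      rw [links_cons_iff] at h2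
      rcases h1 with h | h <;> rw [h2.1] at h <;> simp at h
  | cons p r1 ih =>
    obtain ⟨n, ov⟩ := p
    intro r2 c h1 h2
    cases r2 with
    | nil =>
      rw [links_nil_iff] at h2
      rw [links_cons_iff] at h1
      rcases h2 with h | h <;> rw [h1.1] at h <;> simp at h
    | cons q r2 =>
      obtain ⟨n2, ov2⟩ := q
      rw [links_cons_iff] at h1 h2
      have hheads : n = n2 ∧ ov = ov2 := by
        have h12 := h1.1
        rw [h2.1] at h12
        simpa using h12.symm
      obtain ⟨rfl, rfl⟩ := hheads
      rw [ih r2 n h1.2.2 h2.2.2]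

-- ---- the backward walk realises exactly the forward chains ----
theorem walk_of_chain (g : List (String × List (String × Int))) :
    ∀ (rest : List (String × Int)) (c : String), pvPChain g c rest → pvBstep g c = none →
      ∀ (fuel : Nat), rest.length < fuel → ∀ (names : List String) (acc : Int),
      pvWalkB (pvOccB g) (pvParentB g) fuel (pvEnd c rest) names acc
        = (names ++ (c :: rest.map Prod.fst).dropLast.reverse,
           acc + pvCalcLenA ((c, PySem.Str.len c) :: rest) - PySem.Str.len (pvEnd c rest), c) := by
  intro rest
  induction rest using List.reverseRecOn with
  | nil =>
    intro c hch hb fuel hf names acc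
    obtain ⟨f, rfl⟩ : ∃ f, fuel = f + 1 := ⟨fuel - 1, by omega⟩
    rw [pvEnd_nil]
    rw [pvWalkB]
    rw [pvBstep] at hb
    have hval : pvCalcLenA [(c, PySem.Str.len c)] = PySem.Str.len c := by
      rw [calcLen_single]; ring
    by_cases hocc : (pvOccB g).getD c 0 = 1
    · rw [if_pos hocc] at hb
      rw [if_pos hocc, hb]
      rw [hval]
      simp
    · rw [if_neg hocc]
      rw [hval]
      simp
  | append_singleton r p ih =>
    obtain ⟨t, ov⟩ := p
    intro c hch hb fuel hf names acc
    rw [pchain_snoc] at hch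
    obtain ⟨hch', hlkp, hocct⟩ := hch
    rw [pvEnd_snoc]
    obtain ⟨f, rfl⟩ : ∃ f, fuel = f + 1 := ⟨fuel - 1, by omega⟩
    rw [pvWalkB]
    have hoccD : (pvOccB g).getD t 0 = 1 := by rw [occB_getD, hocct]; rfl
    rw [if_pos hoccD]
    have hpar : (pvParentB g).get? t = some (pvEnd c r, ov) :=
      parent_of_mem g t _ ov (mem_of_look g _ _ hlkp) hocct
    rw [hpar]
    show pvWalkB (pvOccB g) (pvParentB g) f (pvEnd c r) (names ++ [pvEnd c r])
        (acc + PySem.Str.len t - ov + PySem.Str.len (pvEnd c r)) = _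
    have hlen : r.length < f := by
      rw [List.length_append] at hf; simp at hf; omega
    rw [ih c hch' hb f hlen]
    have hnames : (names ++ [pvEnd c r]) ++ (c :: r.map Prod.fst).dropLast.reverse
        = names ++ (c :: (r ++ [(t, ov)]).map Prod.fst).dropLast.reverse := by
      rw [List.append_assoc]
      congr 1
      rw [List.map_append]
      have hr : (c :: (r.map Prod.fst ++ [(t, ov)].map Prod.fst)).dropLast
          = c :: r.map Prod.fst := by
        rw [show ([(t, ov)].map (Prod.fst (β := Int))) = [t] from rfl,
            show c :: (r.map Prod.fst ++ [t]) = (c :: r.map Prod.fst) ++ [t] from rfl,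
            List.dropLast_concat]
      rw [hr, rev_decomp c r]
      rfl
    have hacc2 : acc + PySem.Str.len t - ov + PySem.Str.len (pvEnd c r)
          + pvCalcLenA ((c, PySem.Str.len c) :: r) - PySem.Str.len (pvEnd c r)
        = acc + pvCalcLenA ((c, PySem.Str.len c) :: (r ++ [(t, ov)])) - PySem.Str.len t := by
      have hc := calcLen_append ((c, PySem.Str.len c) :: r) t ov
      rw [show ((c, PySem.Str.len c) :: r) ++ [(t, ov)] = (c, PySem.Str.len c) :: (r ++ [(t, ov)]) from rfl] at hc
      rw [hc]; ring
    rw [hnames, hacc2]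

theorem chain_of_walk (g : List (String × List (String × Int))) (hnd : (g.map Prod.fst).Nodup) :
    ∀ (fuel : Nat) (t : String) (names : List String) (acc : Int)
      (names' : List String) (acc' : Int) (fin : String),
      pvWalkB (pvOccB g) (pvParentB g) fuel t names acc = (names', acc', fin) →
      pvBstep g fin = none →
      ∃ rest, pvPChain g fin rest ∧ pvEnd fin rest = t ∧
        names' = names ++ (fin :: rest.map Prod.fst).dropLast.reverse ∧
        acc' = acc + pvCalcLenA ((fin, PySem.Str.len fin) :: rest) - PySem.Str.len t := by
  intro fuel
  induction fuel with
  | zero =>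
    intro t names acc names' acc' fin h hb
    rw [pvWalkB] at h
    obtain ⟨rfl, rfl, rfl⟩ : names = names' ∧ acc = acc' ∧ t = fin := by
      refine ⟨congrArg (·.1) h, congrArg (·.2.1) h, congrArg (·.2.2) h⟩
    refine ⟨[], trivial, pvEnd_nil _, by simp, by rw [calcLen_single]; ring⟩
  | succ f ih =>
    intro t names acc names' acc' fin h hb
    rw [pvWalkB] at h
    by_cases hocc : (pvOccB g).getD t 0 = 1
    · rw [if_pos hocc] at h
      cases hp : (pvParentB g).get? t with
      | none =>
        rw [hp] at h
        obtain ⟨rfl, rfl, rfl⟩ : names = names' ∧ acc = acc' ∧ t = fin := by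
          refine ⟨congrArg (·.1) h, congrArg (·.2.1) h, congrArg (·.2.2) h⟩
        refine ⟨[], trivial, pvEnd_nil _, by simp, by rw [calcLen_single]; ring⟩
      | some p =>
        obtain ⟨x, ov⟩ := p
        rw [hp] at h
        have h' : pvWalkB (pvOccB g) (pvParentB g) f x (names ++ [x])
            (acc + PySem.Str.len t - ov + PySem.Str.len x) = (names', acc', fin) := h
        have hbs : pvBstep g t = some (x, ov) := by rw [pvBstep, if_pos hocc, hp]
        obtain ⟨hocct, hmem⟩ := bstep_some_mem g t x ov hbs
        obtain ⟨rest', hch, hend, hnames, hacc⟩ := ih x (names ++ [x]) _ _ _ _ h' hb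
        refine ⟨rest' ++ [(t, ov)], ?_, pvEnd_snoc _ _ _ _, ?_, ?_⟩
        · rw [pchain_snoc]
          exact ⟨hch, by rw [hend]; exact look_of_mem g hnd x _ hmem, hocct⟩
        · rw [hnames, List.append_assoc]
          congr 1
          rw [List.map_append]
          have hr : (fin :: (rest'.map Prod.fst ++ [(t, ov)].map Prod.fst)).dropLast
              = fin :: rest'.map Prod.fst := by
            rw [show ([(t, ov)].map (Prod.fst (β := Int))) = [t] from rfl,
                show fin :: (rest'.map Prod.fst ++ [t]) = (fin :: rest'.map Prod.fst) ++ [t] from rfl,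
                List.dropLast_concat]
          rw [hr, rev_decomp fin rest', hend]
          rfl
        · rw [hacc]
          have hc := calcLen_append ((fin, PySem.Str.len fin) :: rest') t ov
          rw [show ((fin, PySem.Str.len fin) :: rest') ++ [(t, ov)] = (fin, PySem.Str.len fin) :: (rest' ++ [(t, ov)]) from rfl] at hc
          rw [hc]
          ring
    · rw [if_neg hocc] at h
      obtain ⟨rfl, rfl, rfl⟩ : names = names' ∧ acc = acc' ∧ t = fin := by
        refine ⟨congrArg (·.1) h, congrArg (·.2.1) h, congrArg (·.2.2) h⟩
      refine ⟨[], trivial, pvEnd_nil _, by simp, by rw [calcLen_single]; ring⟩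

-- ---- A's forward walk realises exactly the chains ----
theorem get?_mk_mem (g : List (String × List (String × Int))) (cur : String)
    (es : List (String × Int)) (h : PySem.Dict.get? (PySem.Dict.mk g) cur = some es) :
    ∃ kv ∈ g, kv.2 = es := by
  simp only [PySem.Dict.get?] at h
  cases hf : List.find? (fun p => p.1 == cur) g with
  | none => rw [hf] at h; simp at h
  | some kv =>
    rw [hf] at h
    simp only [Option.map_some, Option.some.injEq] at h
    exact ⟨kv, List.mem_of_find?_eq_some hf, h⟩

theorem look_eq_find (g : List (String × List (String × Int))) (c : String) :
    pvLook g c = (g.find? (fun kv => kv.1 == c)).map Prod.snd := rfl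

theorem tipStep_of_look (g : List (String × List (String × Int))) (c n : String) (ov : Int)
    (hlk : pvLook g c = some [(n, ov)]) (hocc : pvOccN g n = 1) : pvTipStep g c = some n := by
  rw [look_eq_find] at hlk
  rw [pvTipStep]
  cases hf : g.find? (fun kv => kv.1 == c) with
  | none => rw [hf] at hlk; simp at hlk
  | some kv =>
    rw [hf] at hlk
    simp only [Option.map_some, Option.some.injEq] at hlk
    obtain ⟨k, es⟩ := kv
    simp only at hlk
    subst hlk
    rw [pvOccN] at hocc
    simp [hocc]

theorem links_len_lt (g : List (String × List (String × Int))) :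
    ∀ (rest : List (String × Int)) (c : String) (F : Nat),
      pvPChain g c rest → pvTipIter g F (some c) = none → rest.length < F := by
  intro rest
  induction rest with
  | nil =>
    intro c F _ hiter
    cases F with
    | zero => simp [pvTipIter] at hiter
    | succ f => simp
  | cons p r ih =>
    obtain ⟨n, ov⟩ := p
    intro c F hch hiter
    obtain ⟨hlk, hocc, hch'⟩ := hch
    cases F with
    | zero => simp [pvTipIter] at hiter
    | succ f =>
      have hstep : pvTipStep g c = some n := tipStep_of_look g c n ov hlk hocc
      have hiter' : pvTipIter g f (some n) = none := by
        rw [pvTipIter] at hiter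
        simpa [hstep] using hiter
      have := ih n f hch' hiter'
      simp
      omega

theorem tipA_char (g : List (String × List (String × Int))) :
    ∀ (F : Nat) (c : String) (path : List (String × Int)),
      pvTipIter g F (some c) = none →
      (∃ rest, pvLinks g c rest ∧ pvFindTipA g F c path = path ++ rest)
      ∨ ((∀ r, ¬ pvLinks g c r) ∧ pvFindTipA g F c path = []) := by
  intro F
  induction F with
  | zero => intro c path hiter; simp [pvTipIter] at hiter
  | succ f ih =>
    intro c path hiter
    rw [pvFindTipA]
    split
    next heq =>
      left
      exact ⟨[], (links_nil_iff g c).mpr (Or.inl heq), by simp⟩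
    next es heq =>
      have hlkP : pvLook g c = some es := heq
      by_cases h1 : es.length = 1
      · rw [if_pos h1]
        obtain ⟨e, rfl⟩ : ∃ e, es = [e] := List.length_eq_one_iff.mp h1
        obtain ⟨n, ov⟩ := e
        have hget0 : PySem.List.pyGet? [(n, ov)] 0 = some (n, ov) := rfl
        obtain ⟨kv0, hkv0, hkv02⟩ := get?_mk_mem g c _ heq
        have hpos : 1 ≤ pvOccN g n := occN_pos g kv0 hkv0 n (by rw [hkv02]; simp)
        split
        next nxt ov2 heq2 =>
          obtain ⟨rfl, rfl⟩ : n = nxt ∧ ov = ov2 := by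
            rw [hget0] at heq2
            simpa using heq2
          by_cases hocc : pvOccN g n = 1
          · rw [if_pos (by rw [countA_eq, hocc]; simp)]
            have hstep : pvTipStep g c = some n := tipStep_of_look g c n ov hlkP hocc
            have hiter' : pvTipIter g f (some n) = none := by
              rw [pvTipIter] at hiter
              simpa [hstep] using hiter
            rcases ih n (path ++ [(n, ov)]) hiter' with ⟨rest', hl, he⟩ | ⟨hno, he⟩
            · left
              refine ⟨(n, ov) :: rest', (links_cons_iff g c n ov rest').mpr ⟨hlkP, hocc, hl⟩, ?_⟩
              rw [he, List.append_assoc]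
              rfl
            · right
              refine ⟨?_, he⟩
              intro r hr
              cases r with
              | nil =>
                rw [links_nil_iff] at hr
                rcases hr with hs | hs <;> rw [hlkP] at hs <;> simp at hs
              | cons q r' =>
                obtain ⟨n2, ov2⟩ := q
                rw [links_cons_iff] at hr
                have hh := hr.1
                rw [hlkP] at hh
                obtain ⟨h1e, h2e⟩ : n2 = n ∧ ov2 = ov := by simpa using hh.symm
                exact hno r' (h1e ▸ hr.2.2)
          · have hgt : 1 < pvOccN g n := by omega
            rw [if_neg (by
                  rw [countA_eq]
                  intro hc
                  have hn1 : pvOccN g n = 1 := by exact_mod_cast hc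
                  omega),
                if_pos (by rw [countA_eq]; exact_mod_cast hgt)]
            right
            refine ⟨?_, rfl⟩
            intro r hr
            cases r with
            | nil =>
              rw [links_nil_iff] at hr
              rcases hr with hs | hs <;> rw [hlkP] at hs <;> simp at hs
            | cons q r' =>
              obtain ⟨n2, ov2⟩ := q
              rw [links_cons_iff] at hr
              have hh := hr.1
              rw [hlkP] at hh
              obtain ⟨h1e, h2e⟩ : n2 = n ∧ ov2 = ov := by simpa using hh.symm
              exact absurd (h1e ▸ hr.2.1) hocc
        next heq2 =>
          rw [hget0] at heq2
          cases heq2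
      · rw [if_neg h1]
        by_cases h2 : 1 < es.length
        · rw [if_pos h2]
          right
          refine ⟨?_, rfl⟩
          intro r hr
          cases r with
          | nil =>
            rw [links_nil_iff] at hr
            rcases hr with hs | hs
            · rw [hlkP] at hs; simp at hs
            · rw [hlkP] at hs
              have hes : es = [] := by simpa using hs
              rw [hes] at h2
              simp at h2
          | cons q r' =>
            obtain ⟨n2, ov2⟩ := q
            rw [links_cons_iff] at hr
            have hh := hr.1
            rw [hlkP] at hh
            have hes : es = [(n2, ov2)] := by
              have := hh.symm
              simpa using this.symm
            rw [hes] at h1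
            simp at h1
        · rw [if_neg h2]
          have hes : es = [] := by
            cases es with
            | nil => rfl
            | cons a l =>
              exfalso
              simp only [List.length_cons] at h1 h2
              omega
          left
          refine ⟨[], (links_nil_iff g c).mpr (Or.inr (by rw [hlkP, hes])), by simp⟩

-- ---- membership in the two accumulated removal sets ----
theorem mem_map_fst_update (s : PySem.Set (String × Int)) (tip : List (String × Int)) (x : String) :
    x ∈ (PySem.Set.update s tip).map Prod.fst ↔ x ∈ s.map Prod.fst ∨ x ∈ tip.map Prod.fst := by
  constructor
  · rintro h
    obtain ⟨p, hp, rfl⟩ := List.mem_map.mp h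
    rcases (PySem.Set.mem_update _ _ _).mp hp with h' | h'
    · exact Or.inl (List.mem_map.mpr ⟨p, h', rfl⟩)
    · exact Or.inr (List.mem_map.mpr ⟨p, h', rfl⟩)
  · rintro (h | h) <;> obtain ⟨p, hp, rfl⟩ := List.mem_map.mp h
    · exact List.mem_map.mpr ⟨p, (PySem.Set.mem_update _ _ _).mpr (Or.inl hp), rfl⟩
    · exact List.mem_map.mpr ⟨p, (PySem.Set.mem_update _ _ _).mpr (Or.inr hp), rfl⟩

theorem memA_gen (g : List (String × List (String × Int))) (m : Int) :
    ∀ (l : List String) (s0 : PySem.Set (String × Int)) (x : String),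
      x ∈ (l.foldl (fun s node =>
        if pvIsStartA g node then
          let tip := pvFindTipA g (g.length + 1) node [(node, PySem.Str.len node)]
          if pvCalcLenA tip ≤ m then PySem.Set.update s tip else s
        else s) s0).map Prod.fst
      ↔ x ∈ s0.map Prod.fst ∨ ∃ s ∈ l, pvIsStartA g s = true ∧
          pvCalcLenA (pvTipOf g s) ≤ m ∧ x ∈ (pvTipOf g s).map Prod.fst := by
  intro l
  induction l with
  | nil => intro s0 x; simp
  | cons a l ih =>
    intro s0 x
    simp only [List.foldl_cons]
    rw [ih]
    rw [show pvFindTipA g (g.length + 1) a [(a, PySem.Str.len a)] = pvTipOf g a from rfl]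
    by_cases hst : pvIsStartA g a
    · simp only [hst, if_true]
      by_cases hle : pvCalcLenA (pvTipOf g a) ≤ m
      · rw [if_pos hle]
        rw [mem_map_fst_update]
        constructor
        · rintro ((h | h) | h)
          · exact Or.inl h
          · exact Or.inr ⟨a, List.mem_cons_self, hst, hle, h⟩
          · obtain ⟨s, hs, h1, h2, h3⟩ := h
            exact Or.inr ⟨s, List.mem_cons_of_mem _ hs, h1, h2, h3⟩
        · rintro (h | ⟨s, hs, h1, h2, h3⟩)
          · exact Or.inl (Or.inl h)
          · rcases List.mem_cons.mp hs with rfl | hs'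
            · exact Or.inl (Or.inr h3)
            · exact Or.inr ⟨s, hs', h1, h2, h3⟩
      · rw [if_neg hle]
        constructor
        · rintro (h | ⟨s, hs, h1, h2, h3⟩)
          · exact Or.inl h
          · exact Or.inr ⟨s, List.mem_cons_of_mem _ hs, h1, h2, h3⟩
        · rintro (h | ⟨s, hs, h1, h2, h3⟩)
          · exact Or.inl h
          · rcases List.mem_cons.mp hs with rfl | hs'
            · exact absurd h2 hle
            · exact Or.inr ⟨s, hs', h1, h2, h3⟩
    · simp only [hst, Bool.false_eq_true, if_false]
      constructor
      · rintro (h | ⟨s, hs, h1, h2, h3⟩)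
        · exact Or.inl h
        · exact Or.inr ⟨s, List.mem_cons_of_mem _ hs, h1, h2, h3⟩
      · rintro (h | ⟨s, hs, h1, h2, h3⟩)
        · exact Or.inl h
        · rcases List.mem_cons.mp hs with rfl | hs'
          · rw [h1] at hst; exact absurd rfl hst
          · exact Or.inr ⟨s, hs', h1, h2, h3⟩

def pvCondB (g : List (String × List (String × Int))) (m : Int) (t : String) : Bool :=
  let r := pvWalkB (pvOccB g) (pvParentB g) (g.length + 1) t [t] (PySem.Str.len t)
  PySem.Dict.contains (PySem.Dict.mk g) r.2.2
    && PySem.Set.contains (pvBranchB g) r.2.2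
    && decide (r.2.1 ≤ m)

theorem memB_gen (g : List (String × List (String × Int))) (m : Int) :
    ∀ (l : List String) (s0 : PySem.Set String) (x : String),
      x ∈ l.foldl (fun s t =>
        let r := pvWalkB (pvOccB g) (pvParentB g) (g.length + 1) t [t] (PySem.Str.len t)
        if PySem.Dict.contains (PySem.Dict.mk g) r.2.2
            && PySem.Set.contains (pvBranchB g) r.2.2
            && decide (r.2.1 ≤ m)
        then PySem.Set.update s r.1 else s) s0
      ↔ x ∈ s0 ∨ ∃ t ∈ l, pvCondB g m t = true ∧
          x ∈ (pvWalkB (pvOccB g) (pvParentB g) (g.length + 1) t [t] (PySem.Str.len t)).1 := by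
  intro l
  induction l with
  | nil => intro s0 x; simp
  | cons a l ih =>
    intro s0 x
    simp only [List.foldl_cons]
    rw [ih]
    rw [show (PySem.Dict.contains (PySem.Dict.mk g)
          (pvWalkB (pvOccB g) (pvParentB g) (g.length + 1) a [a] (PySem.Str.len a)).2.2
        && PySem.Set.contains (pvBranchB g)
          (pvWalkB (pvOccB g) (pvParentB g) (g.length + 1) a [a] (PySem.Str.len a)).2.2
        && decide ((pvWalkB (pvOccB g) (pvParentB g) (g.length + 1) a [a] (PySem.Str.len a)).2.1 ≤ m))
        = pvCondB g m a from rfl]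
    by_cases hc : pvCondB g m a = true
    · rw [if_pos hc]
      rw [PySem.Set.mem_update]
      constructor
      · rintro ((h | h) | h)
        · exact Or.inl h
        · exact Or.inr ⟨a, List.mem_cons_self, hc, h⟩
        · obtain ⟨t, ht, h1, h2⟩ := h
          exact Or.inr ⟨t, List.mem_cons_of_mem _ ht, h1, h2⟩
      · rintro (h | ⟨t, ht, h1, h2⟩)
        · exact Or.inl (Or.inl h)
        · rcases List.mem_cons.mp ht with rfl | ht'
          · exact Or.inl (Or.inr h2)
          · exact Or.inr ⟨t, ht', h1, h2⟩
    · rw [if_neg hc]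
      constructor
      · rintro (h | ⟨t, ht, h1, h2⟩)
        · exact Or.inl h
        · exact Or.inr ⟨t, List.mem_cons_of_mem _ ht, h1, h2⟩
      · rintro (h | ⟨t, ht, h1, h2⟩)
        · exact Or.inl h
        · rcases List.mem_cons.mp ht with rfl | ht'
          · exact absurd h1 hc
          · exact Or.inr ⟨t, ht', h1, h2⟩

-- ---- the heart: forward tips from branch children = backward walks from sinks ----
theorem contains_key_iff (g : List (String × List (String × Int))) (y : String) :
    PySem.Dict.contains (PySem.Dict.mk g) y = true ↔ y ∈ g.map Prod.fst := by
  rw [PySem.Dict.contains_eq_decide_mem_keys]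
  simp

theorem main_mem (g : List (String × List (String × Int))) (m : Int)
    (hnd : (g.map Prod.fst).Nodup)
    (hpre : ∀ kv ∈ g, (∃ kv' ∈ g, kv.1 ∈ kv'.2.map Prod.fst ∧ 1 < kv'.2.length) →
      pvTipIter g (g.length + 1) (some kv.1) = none) (x : String) :
    (∃ s ∈ g.map Prod.fst, pvIsStartA g s = true ∧
        pvCalcLenA (pvTipOf g s) ≤ m ∧ x ∈ (pvTipOf g s).map Prod.fst)
    ↔ (∃ t ∈ pvSinksB g, pvCondB g m t = true ∧
        x ∈ (pvWalkB (pvOccB g) (pvParentB g) (g.length + 1) t [t] (PySem.Str.len t)).1) := by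
  constructor
  · rintro ⟨s, hs, hstart, hlen, hx⟩
    have hstartP : ∃ kv' ∈ g, s ∈ kv'.2.map Prod.fst ∧ 1 < kv'.2.length :=
      (isStartA_iff g s).mp hstart
    obtain ⟨kv, hkv, hkv1⟩ := List.mem_map.mp hs
    have hiter : pvTipIter g (g.length + 1) (some s) = none := by
      rw [← hkv1]
      exact hpre kv hkv (by rw [hkv1]; exact hstartP)
    rcases tipA_char g (g.length + 1) s [(s, PySem.Str.len s)] hiter with
      ⟨rest, hlinks, he⟩ | ⟨-, he⟩
    · have heT : pvTipOf g s = (s, PySem.Str.len s) :: rest := he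
      have hsink : pvSink g (pvEnd s rest) := hlinks.2
      have htin : pvEnd s rest ∈ pvSinksB g := by
        rw [sinks_mem]
        rcases hsink with hn | hsome
        · right
          rcases List.eq_nil_or_concat rest with rfl | ⟨r', p, hre⟩
          · exfalso
            rw [pvEnd_nil] at hn
            exact (look_none_iff g s).mp hn hs
          · obtain ⟨t0, ov0⟩ := p
            rw [List.concat_eq_append] at hre
            subst hre
            have hch := hlinks.1
            rw [pchain_snoc] at hch
            obtain ⟨-, hlkp, -⟩ := hch
            refine ⟨(pvEnd s r', [(t0, ov0)]), mem_of_look g _ _ hlkp, ?_, hn⟩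
            rw [pvEnd_snoc]
            simp
        · left
          exact mem_of_look g _ _ hsome
      have hb : pvBstep g s = none := bstep_none_of_branch g s hstartP
      have hflt : rest.length < g.length + 1 := links_len_lt g rest s _ hlinks.1 hiter
      have hw := walk_of_chain g rest s hlinks.1 hb (g.length + 1) hflt
        [pvEnd s rest] (PySem.Str.len (pvEnd s rest))
      refine ⟨pvEnd s rest, htin, ?_, ?_⟩
      · rw [pvCondB]
        show (PySem.Dict.contains (PySem.Dict.mk g)
            (pvWalkB (pvOccB g) (pvParentB g) (g.length + 1) (pvEnd s rest) [pvEnd s rest]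
              (PySem.Str.len (pvEnd s rest))).2.2
          && PySem.Set.contains (pvBranchB g)
            (pvWalkB (pvOccB g) (pvParentB g) (g.length + 1) (pvEnd s rest) [pvEnd s rest]
              (PySem.Str.len (pvEnd s rest))).2.2
          && decide ((pvWalkB (pvOccB g) (pvParentB g) (g.length + 1) (pvEnd s rest) [pvEnd s rest]
              (PySem.Str.len (pvEnd s rest))).2.1 ≤ m)) = true
        rw [hw]
        rw [Bool.and_eq_true, Bool.and_eq_true]
        refine ⟨⟨(contains_key_iff g s).mpr hs, ?_⟩, ?_⟩
        · rw [branch_contains]; exact hstart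
        · rw [decide_eq_true_iff]
          rw [heT] at hlen
          have harith : PySem.Str.len (pvEnd s rest) + pvCalcLenA ((s, PySem.Str.len s) :: rest)
              - PySem.Str.len (pvEnd s rest) = pvCalcLenA ((s, PySem.Str.len s) :: rest) := by ring
          rw [harith]
          exact hlen
      · rw [hw]
        show x ∈ [pvEnd s rest] ++ (s :: rest.map Prod.fst).dropLast.reverse
        have hxl : x ∈ s :: rest.map Prod.fst := by
          rw [heT] at hx
          simpa using hx
        rw [show ([pvEnd s rest] ++ (s :: rest.map Prod.fst).dropLast.reverse : List String)
            = pvEnd s rest :: (s :: rest.map Prod.fst).dropLast.reverse from rfl]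
        rw [← rev_decomp s rest]
        rw [List.mem_reverse]
        exact hxl
    · exfalso
      have heT : pvTipOf g s = [] := he
      rw [heT] at hx
      simp at hx
  · rintro ⟨t, ht, hcond, hx⟩
    rw [pvCondB] at hcond
    rw [show (let r := pvWalkB (pvOccB g) (pvParentB g) (g.length + 1) t [t] (PySem.Str.len t)
        PySem.Dict.contains (PySem.Dict.mk g) r.2.2
          && PySem.Set.contains (pvBranchB g) r.2.2
          && decide (r.2.1 ≤ m))
        = (PySem.Dict.contains (PySem.Dict.mk g)
            (pvWalkB (pvOccB g) (pvParentB g) (g.length + 1) t [t] (PySem.Str.len t)).2.2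
          && PySem.Set.contains (pvBranchB g)
            (pvWalkB (pvOccB g) (pvParentB g) (g.length + 1) t [t] (PySem.Str.len t)).2.2
          && decide ((pvWalkB (pvOccB g) (pvParentB g) (g.length + 1) t [t] (PySem.Str.len t)).2.1 ≤ m))
        from rfl] at hcond
    rw [Bool.and_eq_true, Bool.and_eq_true] at hcond
    obtain ⟨⟨hc1, hc2⟩, hc3⟩ := hcond
    have hb : pvBstep g (pvWalkB (pvOccB g) (pvParentB g) (g.length + 1) t [t] (PySem.Str.len t)).2.2 = none := by
      apply bstep_none_of_branch
      rw [PySem.Set.contains_iff, branchB_mem] at hc2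
      exact hc2
    obtain ⟨rest, hch, hend, hnames, hacc⟩ :=
      chain_of_walk g hnd (g.length + 1) t [t] (PySem.Str.len t)
        (pvWalkB (pvOccB g) (pvParentB g) (g.length + 1) t [t] (PySem.Str.len t)).1
        (pvWalkB (pvOccB g) (pvParentB g) (g.length + 1) t [t] (PySem.Str.len t)).2.1
        (pvWalkB (pvOccB g) (pvParentB g) (g.length + 1) t [t] (PySem.Str.len t)).2.2
        rfl hb
    have hstartP : ∃ kv' ∈ g,
        (pvWalkB (pvOccB g) (pvParentB g) (g.length + 1) t [t] (PySem.Str.len t)).2.2 ∈ kv'.2.map Prod.fst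
        ∧ 1 < kv'.2.length := by
      rw [PySem.Set.contains_iff, branchB_mem] at hc2
      exact hc2
    have hfk : (pvWalkB (pvOccB g) (pvParentB g) (g.length + 1) t [t] (PySem.Str.len t)).2.2
        ∈ g.map Prod.fst := (contains_key_iff g _).mp hc1
    have hsink : pvSink g t := by
      rcases (sinks_mem g t).mp ht with hm | ⟨kv', hkv', hmem', hn⟩
      · exact Or.inr (look_of_mem g hnd t _ hm)
      · exact Or.inl hn
    have hlinks : pvLinks g (pvWalkB (pvOccB g) (pvParentB g) (g.length + 1) t [t] (PySem.Str.len t)).2.2 rest :=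
      ⟨hch, by rw [hend]; exact hsink⟩
    obtain ⟨kv, hkv, hkv1⟩ := List.mem_map.mp hfk
    have hiter : pvTipIter g (g.length + 1)
        (some (pvWalkB (pvOccB g) (pvParentB g) (g.length + 1) t [t] (PySem.Str.len t)).2.2) = none := by
      rw [← hkv1]
      exact hpre kv hkv (by rw [hkv1]; exact hstartP)
    rcases tipA_char g (g.length + 1)
        (pvWalkB (pvOccB g) (pvParentB g) (g.length + 1) t [t] (PySem.Str.len t)).2.2
        [((pvWalkB (pvOccB g) (pvParentB g) (g.length + 1) t [t] (PySem.Str.len t)).2.2,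
          PySem.Str.len (pvWalkB (pvOccB g) (pvParentB g) (g.length + 1) t [t] (PySem.Str.len t)).2.2)]
        hiter with ⟨rest2, hl2, he2⟩ | ⟨hno, -⟩
    · have hr2 : rest2 = rest := links_det g rest2 rest _ hl2 hlinks
      subst hr2
      refine ⟨(pvWalkB (pvOccB g) (pvParentB g) (g.length + 1) t [t] (PySem.Str.len t)).2.2,
        hfk, (isStartA_iff g _).mpr hstartP, ?_, ?_⟩
      · rw [show pvTipOf g (pvWalkB (pvOccB g) (pvParentB g) (g.length + 1) t [t] (PySem.Str.len t)).2.2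
            = pvFindTipA g (g.length + 1)
                (pvWalkB (pvOccB g) (pvParentB g) (g.length + 1) t [t] (PySem.Str.len t)).2.2
                [((pvWalkB (pvOccB g) (pvParentB g) (g.length + 1) t [t] (PySem.Str.len t)).2.2,
                  PySem.Str.len (pvWalkB (pvOccB g) (pvParentB g) (g.length + 1) t [t] (PySem.Str.len t)).2.2)]
            from rfl, he2]
        rw [decide_eq_true_iff] at hc3
        rw [hacc] at hc3
        have harith : PySem.Str.len t + pvCalcLenA
              (((pvWalkB (pvOccB g) (pvParentB g) (g.length + 1) t [t] (PySem.Str.len t)).2.2,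
                PySem.Str.len (pvWalkB (pvOccB g) (pvParentB g) (g.length + 1) t [t] (PySem.Str.len t)).2.2) :: rest2)
            - PySem.Str.len t = pvCalcLenA
              (((pvWalkB (pvOccB g) (pvParentB g) (g.length + 1) t [t] (PySem.Str.len t)).2.2,
                PySem.Str.len (pvWalkB (pvOccB g) (pvParentB g) (g.length + 1) t [t] (PySem.Str.len t)).2.2) :: rest2) := by
          ring
        rw [harith] at hc3
        simpa using hc3
      · rw [show pvTipOf g (pvWalkB (pvOccB g) (pvParentB g) (g.length + 1) t [t] (PySem.Str.len t)).2.2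
            = pvFindTipA g (g.length + 1)
                (pvWalkB (pvOccB g) (pvParentB g) (g.length + 1) t [t] (PySem.Str.len t)).2.2
                [((pvWalkB (pvOccB g) (pvParentB g) (g.length + 1) t [t] (PySem.Str.len t)).2.2,
                  PySem.Str.len (pvWalkB (pvOccB g) (pvParentB g) (g.length + 1) t [t] (PySem.Str.len t)).2.2)]
            from rfl, he2]
        rw [hnames] at hx
        have hrd := rev_decomp (pvWalkB (pvOccB g) (pvParentB g) (g.length + 1) t [t] (PySem.Str.len t)).2.2 rest2
        rw [hend] at hrd
        have hx' : x ∈ ((pvWalkB (pvOccB g) (pvParentB g) (g.length + 1) t [t] (PySem.Str.len t)).2.2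
            :: rest2.map Prod.fst).reverse := by
          rw [hrd]; exact hx
        rw [List.mem_reverse] at hx'
        simpa using hx'
    · exact absurd hlinks (hno rest)

-- ---- A's removal loop (pop + neighbour filtering) as one rebuild pass ----
theorem erase_mk_items (g : List (String × List (String × Int))) (n : String) :
    (PySem.Dict.erase (PySem.Dict.mk g) n).items = g.filter (fun kv => !kv.1 == n) := rfl

theorem removal_fold (L : List (String × Int)) :
    ∀ g0 : List (String × List (String × Int)),
      L.foldl (fun g2 p =>
          (PySem.Dict.erase (PySem.Dict.mk g2) p.1).items.map
            (fun kv => (kv.1, kv.2.filter (fun e => e.1 != p.1)))) g0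
      = (g0.filter (fun kv => !(L.map Prod.fst).contains kv.1)).map
          (fun kv => (kv.1, kv.2.filter (fun e => !(L.map Prod.fst).contains e.1))) := by
  induction L with
  | nil =>
    intro g0
    simp [List.filter_true]
  | cons p L ih =>
    intro g0
    simp only [List.foldl_cons]
    rw [ih]
    rw [erase_mk_items]
    rw [List.filter_map, List.map_map, List.filter_filter]
    have hfil : g0.filter (fun kv =>
          ((fun kv : String × List (String × Int) => !(L.map Prod.fst).contains kv.1) ∘
            fun kv : String × List (String × Int) =>
              (kv.1, kv.2.filter (fun e => e.1 != p.1))) kv && !kv.1 == p.1)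
        = g0.filter (fun kv => !((p :: L).map Prod.fst).contains kv.1) := by
      apply List.filter_congr
      intro kv _
      simp only [Function.comp_apply, List.map_cons, List.contains_cons, Bool.not_or]
      cases h1 : kv.1 == p.1 <;> cases h2 : (L.map Prod.fst).contains kv.1 <;> simp_all [BEq.comm]
    rw [hfil]
    apply List.map_congr_left
    intro kv _
    simp only [Function.comp_apply, List.filter_filter]
    congr 1
    apply List.filter_congr
    intro e _
    simp only [List.map_cons, List.contains_cons, Bool.not_or, bne]
    cases h1 : e.1 == p.1 <;> cases h2 : (L.map Prod.fst).contains e.1 <;> simp_all [BEq.comm]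

-- ===== VERDICT (by name: the statement is the Claim_ definition above) =====
theorem remove_tips_spec : Claim_equal_remove_tips := by
  intro graph m _ hpre
  obtain ⟨hnd, hter⟩ := hpre
  unfold Spec_remove_tips remove_tips remove_tips_alt
  simp only []
  rw [removal_fold]
  have hmem : ∀ y : String,
      (((graph.map Prod.fst).foldl (fun s node =>
          if pvIsStartA graph node then
            let tip := pvFindTipA graph (graph.length + 1) node [(node, PySem.Str.len node)]
            if pvCalcLenA tip ≤ m then PySem.Set.update s tip else s
          else s) PySem.Set.empty).map Prod.fst).contains y
      = PySem.Set.contains ((pvSinksB graph).foldl (fun s t =>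
          let r := pvWalkB (pvOccB graph) (pvParentB graph) (graph.length + 1) t [t] (PySem.Str.len t)
          if PySem.Dict.contains (PySem.Dict.mk graph) r.2.2
              && PySem.Set.contains (pvBranchB graph) r.2.2
              && decide (r.2.1 ≤ m)
          then PySem.Set.update s r.1 else s) PySem.Set.empty) y := by
    intro y
    rw [Bool.eq_iff_iff, PySem.Set.contains_iff, List.contains_iff_mem]
    rw [memA_gen, memB_gen]
    simp only [PySem.Set.empty, List.map_nil, List.not_mem_nil, false_or]
    exact main_mem graph m hnd hter y
  rw [List.filter_congr (fun kv _ => by rw [hmem kv.1])]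
  apply List.map_congr_left
  intro kv _
  refine Prod.ext rfl ?_
  exact List.filter_congr (fun e _ => by rw [hmem e.1])
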